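-- pv_equiv track=rewrite | github.com/Milkessa97/A2SV_Solved_Questions | 2278-find-three-consecutive-integers-that-sum-to-a-given-number/find-three-consecutive-integers-that-sum-to-a-given-number.py | sumOfThree
-- ===== SOURCE A (Python) =====
-- from typing import List
--
-- def sumOfThree(num: int) -> List[int]:
--     first_elt = num // 3
--
--     while first_elt*3 + 3 >= num:
--         if first_elt*3 + 3 ==  num:
--             return [first_elt, first_elt + 1, first_elt + 2]
--
--         elif first_elt*3 + 3 < num:
--             return []
--
--         first_elt -= 1
--     return []
-- ===== SOURCE B (Python) =====
-- def sumOfThree(num: int):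
--     if num % 3 != 0:
--         return []
--     mid = num // 3
--     return [mid - 1, mid, mid + 1]
-- ===== Notes on version B (the rewrite author's own statement) =====
-- stated objective: simpler
-- what changed: Replaced the decrementing while-loop search over candidate first elements with a direct closed form: divisibility test num % 3 == 0 and the triple centred on num // 3.
import Mathlib
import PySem

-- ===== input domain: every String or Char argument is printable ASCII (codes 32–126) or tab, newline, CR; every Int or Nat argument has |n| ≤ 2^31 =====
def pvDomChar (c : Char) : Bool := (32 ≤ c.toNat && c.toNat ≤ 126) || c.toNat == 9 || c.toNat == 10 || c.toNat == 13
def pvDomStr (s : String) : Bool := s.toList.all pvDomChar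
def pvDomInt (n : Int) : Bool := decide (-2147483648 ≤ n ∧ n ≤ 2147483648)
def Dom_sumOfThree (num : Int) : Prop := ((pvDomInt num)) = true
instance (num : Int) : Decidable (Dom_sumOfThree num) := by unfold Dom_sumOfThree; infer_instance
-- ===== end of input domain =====

-- B replaces A's decrementing while-loop with a closed-form divisibility test; equal on all inputs.
-- ===== PORT A =====
-- the while loop of A: decrements first_elt while first_elt*3 + 3 >= num.
-- fuel only totalizes the recursion (2 condition checks always suffice from first_elt = num // 3).
def sumOfThreeLoop (num : Int) : Nat → Int → List Int
  | 0, _ => []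
  | Nat.succ fuel, first_elt =>
    if first_elt * 3 + 3 ≥ num then
      if first_elt * 3 + 3 = num then [first_elt, first_elt + 1, first_elt + 2]
      else if first_elt * 3 + 3 < num then []
      else sumOfThreeLoop num fuel (first_elt - 1)
    else []

def sumOfThree (num : Int) : List Int :=
  sumOfThreeLoop num 2 (PySem.Int.floordiv num 3)

-- ===== PORT B =====
def sumOfThree_alt (num : Int) : List Int :=
  if PySem.Int.mod num 3 ≠ 0 then []
  else
    let mid := PySem.Int.floordiv num 3
    [mid - 1, mid, mid + 1]

-- ===== PRECONDITION & SPEC =====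
def Spec_sumOfThree (num : Int) (out : List Int) : Prop := out = sumOfThree_alt num
instance (num : Int) (out : List Int) : Decidable (Spec_sumOfThree num out) := by unfold Spec_sumOfThree; infer_instance

-- ===== CLAIM (what is proved, stated in full; the proofs are below) =====
def Claim_equal_sumOfThree : Prop := ∀ (num : Int), Dom_sumOfThree num → Spec_sumOfThree num (sumOfThree num)

-- ===== LEMMAS AND PROOFS =====
theorem sumOfThreeLoop_succ (num : Int) (k : Nat) (f : Int) :
    sumOfThreeLoop num (k + 1) f =
      if f * 3 + 3 ≥ num then
        if f * 3 + 3 = num then [f, f + 1, f + 2]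
        else if f * 3 + 3 < num then []
        else sumOfThreeLoop num k (f - 1)
      else [] := rfl

-- ===== VERDICT (by name: the statement is the Claim_ definition above) =====
theorem sumOfThree_spec : Claim_equal_sumOfThree := by
  intro num _
  unfold Spec_sumOfThree sumOfThree sumOfThree_alt
  rw [PySem.Int.floordiv_eq_ediv_of_pos (by norm_num), PySem.Int.mod_eq_emod_of_pos (by norm_num)]
  rw [(by norm_num : (2 : Nat) = 1 + 1), sumOfThreeLoop_succ,
    if_pos (by omega : num / 3 * 3 + 3 ≥ num), if_neg (by omega : ¬ num / 3 * 3 + 3 = num),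
    if_neg (by omega : ¬ num / 3 * 3 + 3 < num), (by norm_num : (1 : Nat) = 0 + 1), sumOfThreeLoop_succ]
  by_cases h : num % 3 = 0
  · rw [if_pos (by omega : (num / 3 - 1) * 3 + 3 ≥ num),
      if_pos (by omega : (num / 3 - 1) * 3 + 3 = num), if_neg (by omega : ¬ num % 3 ≠ 0)]
    have h2 : num / 3 - 1 + 1 = num / 3 := by omega
    have h3 : num / 3 - 1 + 2 = num / 3 + 1 := by omega
    rw [h2, h3]
  · rw [if_neg (by omega : ¬ (num / 3 - 1) * 3 + 3 ≥ num), if_pos h]
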